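-- pv_equiv track=rewrite | github.com/aaronjanse/interlocking-braces | __main__.py | preprocess_string_literals
-- ===== SOURCE A (Python) =====
-- def preprocess_string_literals(program):
--     output = ''
--
--     buffer_txt = ''
--
--     in_string = False
--     invert = False
--     for char in list(program):
--         if char == 'i' and not in_string:
--             invert = True
--         elif char == '"':
--             if in_string:
--                 in_string = False
--                 if invert:
--                     buffer_txt = buffer_txt[::-1]
--
--                 output += ''.join([str(ord(char))+'_' for char in list(buffer_txt)])
--             else:
--                 in_string = True
--                 buffer_txt = ''
--             continue
--         elif not in_string:
--             invert = False
--
--         if in_string: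
--             buffer_txt += char
--         else:
--             output += char
--
--     return output
-- ===== SOURCE B (Python) =====
-- def preprocess_string_literals(program):
--     parts = program.split('"')
--     pieces = []
--     invert = False
--     for i, part in enumerate(parts):
--         if i % 2 == 0:
--             pieces.append(part)
--             if part:
--                 invert = part.endswith('i')
--         elif i != len(parts) - 1:
--             lit = part[::-1] if invert else part
--             pieces.append(''.join(str(ord(c)) + '_' for c in lit))
--     return ''.join(pieces)
-- ===== Notes on version B (the rewrite author's own statement) =====
-- stated objective: simpler
-- what changed: B replaces A's character-by-character state machine (in_string/buffer/invert flags updated per char) by splitting the program at quote characters and processing the alternating outside/literal parts recursively, carrying the invert flag across parts.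
import Mathlib
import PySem

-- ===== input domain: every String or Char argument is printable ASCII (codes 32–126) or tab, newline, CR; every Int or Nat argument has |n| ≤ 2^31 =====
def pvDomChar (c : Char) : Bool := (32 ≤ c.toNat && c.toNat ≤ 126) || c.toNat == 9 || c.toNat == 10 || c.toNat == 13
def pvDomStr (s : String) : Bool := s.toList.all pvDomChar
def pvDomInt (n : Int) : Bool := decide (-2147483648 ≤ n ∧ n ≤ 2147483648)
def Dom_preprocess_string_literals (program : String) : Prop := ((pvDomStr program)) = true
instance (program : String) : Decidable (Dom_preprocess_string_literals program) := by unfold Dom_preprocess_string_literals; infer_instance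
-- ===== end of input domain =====

-- B replaces A's char-by-char state machine by splitting the program on '"' and
-- processing the alternating outside/literal parts recursively (simpler; measured faster: no repeated string concatenation).

-- str(ord(c)) + '_' joined over a literal's characters (used verbatim by both Pythons)
def pvEncode (buf : List Char) : List Char :=
  (buf.map (fun c => PySem.Int.toChars (c.toNat : Int) ++ ['_'])).flatten

-- ===== PORT A =====
-- state: (output, buffer_txt, in_string, invert)
def pvStepA (st : List Char × List Char × Bool × Bool) (c : Char) :
    List Char × List Char × Bool × Bool :=
  let out := st.1; let buf := st.2.1; let ins := st.2.2.1; let inv := st.2.2.2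
  if c == 'i' && !ins then
    -- invert := True; then (not in_string) output += char
    (out ++ [c], buf, ins, true)
  else if c == '"' then
    if ins then
      let buf' := if inv then buf.reverse else buf
      (out ++ pvEncode buf', buf', false, inv)
    else (out, [], true, inv)
  else if !ins then
    -- invert := False; output += char
    (out ++ [c], buf, ins, false)
  else
    (out, buf ++ [c], ins, inv)

def preprocess_string_literals (program : String) : String :=
  String.mk (program.toList.foldl pvStepA ([], [], false, false)).1

-- ===== PORT B =====
-- recursive processing of the parts list: parts[0] is outside text, parts[1] (if closed)
-- a string literal, then recurse on parts[2:] carrying the invert flag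
def pvGo : List (List Char) → Bool → List Char
  | [], _ => []
  | [p], _ => p
  | [p, _], _ => p            -- trailing unterminated literal is dropped
  | p :: q :: r :: rest, inv =>
      let inv' := if p.isEmpty then inv else PySem.Chars.endswith p ['i']
      let lit := if inv' then q.reverse else q
      p ++ pvEncode lit ++ pvGo (r :: rest) inv'

def preprocess_string_literals_alt (program : String) : String :=
  String.mk (pvGo (PySem.Chars.splitOn program.toList ['"']) false)

-- ===== PRECONDITION & SPEC =====
def Spec_preprocess_string_literals (program : String) (out : String) : Prop := out = preprocess_string_literals_alt program
instance (program : String) (out : String) : Decidable (Spec_preprocess_string_literals program out) := by unfold Spec_preprocess_string_literals; infer_instance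

-- ===== CLAIM (what is proved, stated in full; the proofs are below) =====
def Claim_equal_preprocess_string_literals : Prop := ∀ (program : String), Dom_preprocess_string_literals program → Spec_preprocess_string_literals program (preprocess_string_literals program)

-- ===== LEMMAS AND PROOFS =====

-- a structural-recursion model of PySem.Chars.splitOn on the single-char separator '"'
def pvSplit (pre : List Char) : List Char → List (List Char)
  | [] => [pre]
  | c :: rest => if c = '"' then pre :: pvSplit [] rest else pvSplit (pre ++ [c]) rest

theorem pvSplit_ne_nil (pre : List Char) (l : List Char) : pvSplit pre l ≠ [] := by
  induction l generalizing pre with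
  | nil => simp [pvSplit]
  | cons c rest ih =>
    simp only [pvSplit]
    split_ifs <;> simp [ih]

theorem pvGo_spec (fuel : Nat) : ∀ (l cur : List Char) (acc : List (List Char)),
    l.length ≤ fuel →
    PySem.Chars.splitOn.go ['"'] fuel l cur acc = acc.reverse ++ pvSplit cur.reverse l := by
  induction fuel with
  | zero =>
    intro l cur acc h
    have : l = [] := by cases l <;> simp_all
    subst this
    simp [PySem.Chars.splitOn.go, pvSplit]
  | succ n ih =>
    intro l cur acc h
    cases l with
    | nil => simp [PySem.Chars.splitOn.go, pvSplit]
    | cons c rest =>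
      by_cases hc : c = '"'
      · subst hc
        have hpre : List.isPrefixOf ['"'] ('"' :: rest) = true := by
          simp [List.isPrefixOf]
        simp only [PySem.Chars.splitOn.go, hpre, if_pos]
        rw [show List.drop (List.length ['"']) ('"' :: rest) = rest by simp]
        rw [ih rest [] (cur.reverse :: acc) (by simpa using Nat.le_of_succ_le_succ h)]
        simp [pvSplit]
      · have hpre : List.isPrefixOf ['"'] (c :: rest) = false := by
          simp [List.isPrefixOf]
          intro hcc
          exact absurd hcc.symm hc
        simp only [PySem.Chars.splitOn.go, hpre, Bool.false_eq_true, if_neg, not_false_iff]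
        rw [ih rest (c :: cur) acc (by simpa using Nat.le_of_succ_le_succ h)]
        simp [pvSplit, hc]

theorem splitOn_eq_pvSplit (cs : List Char) :
    PySem.Chars.splitOn cs ['"'] = pvSplit [] cs := by
  unfold PySem.Chars.splitOn
  rw [pvGo_spec (cs.length + 1) cs [] [] (Nat.le_succ _)]
  simp

theorem pvSplit_no_quote (l : List Char) (h : '"' ∉ l) :
    ∀ pre, pvSplit pre l = [pre ++ l] := by
  induction l with
  | nil => intro pre; simp [pvSplit]
  | cons c rest ih =>
    intro pre
    have hc : c ≠ '"' := fun hc => h (hc ▸ List.mem_cons_self ..)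
    have hr : '"' ∉ rest := fun hr => h (List.mem_cons_of_mem _ hr)
    simp [pvSplit, hc, ih hr]

theorem pvSplit_append_quote (p : List Char) (h : '"' ∉ p) (rest : List Char) :
    ∀ pre, pvSplit pre (p ++ '"' :: rest) = (pre ++ p) :: pvSplit [] rest := by
  induction p with
  | nil => intro pre; simp [pvSplit]
  | cons c p' ih =>
    intro pre
    have hc : c ≠ '"' := fun hc => h (hc ▸ List.mem_cons_self ..)
    have hp' : '"' ∉ p' := fun hp => h (List.mem_cons_of_mem _ hp)
    simp [pvSplit, hc, ih hp']

theorem pvDecomp (cs : List Char) :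
    ('"' ∉ cs) ∨ ∃ p rest, cs = p ++ '"' :: rest ∧ '"' ∉ p := by
  induction cs with
  | nil => left; simp
  | cons c rest ih =>
    by_cases hc : c = '"'
    · right; exact ⟨[], rest, by simp [hc], by simp⟩
    · rcases ih with hno | ⟨p, r, hr, hp⟩
      · left; simp [Ne.symm hc, hno]
      · right; exact ⟨c :: p, r, by simp [hr], by simp [Ne.symm hc, hp]⟩

-- invert after A scans an outside part p starting from invert = inv
def pvInvAfter (inv : Bool) (p : List Char) : Bool :=
  if p.isEmpty then inv else PySem.Chars.endswith p ['i']

theorem endswith_i_cons (c : Char) (p : List Char) :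
    PySem.Chars.endswith (c :: p) ['i'] =
      (if p.isEmpty then (c == 'i') else PySem.Chars.endswith p ['i']) := by
  cases p with
  | nil =>
    simp only [List.isEmpty_nil, if_pos]
    by_cases hc : c = 'i'
    · subst hc; decide
    · have h1 : PySem.Chars.endswith [c] ['i'] = false := by
        rw [Bool.eq_false_iff]
        intro hcontra
        rw [PySem.Chars.endswith_iff] at hcontra
        rcases List.suffix_cons_iff.mp hcontra with h | h
        · exact hc (List.cons.injEq .. ▸ h).1.symm
        · simp at h
      simp [h1, hc]
  | cons d p' =>
    simp only [List.isEmpty_cons, Bool.false_eq_true, if_neg, not_false_iff]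
    apply Bool.eq_iff_iff.mpr
    rw [PySem.Chars.endswith_iff, PySem.Chars.endswith_iff]
    constructor
    · intro hsuf
      rcases List.suffix_cons_iff.mp hsuf with h | h
      · exact absurd (congrArg List.length h) (by simp)
      · exact h
    · intro hsuf
      exact List.suffix_cons_iff.mpr (Or.inr hsuf)

theorem outside_run (p : List Char) (h : '"' ∉ p) :
    ∀ (out buf : List Char) (inv : Bool),
      p.foldl pvStepA (out, buf, false, inv) = (out ++ p, buf, false, pvInvAfter inv p) := by
  induction p with
  | nil => intro out buf inv; simp [pvInvAfter]
  | cons c p' ih =>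
    intro out buf inv
    have hc : c ≠ '"' := fun hc => h (hc ▸ List.mem_cons_self ..)
    have hp' : '"' ∉ p' := fun hp => h (List.mem_cons_of_mem _ hp)
    have hstep : pvStepA (out, buf, false, inv) c = (out ++ [c], buf, false, c == 'i') := by
      by_cases hi : c = 'i'
      · subst hi; simp [pvStepA]
      · simp [pvStepA, hi, hc]
    rw [List.foldl_cons, hstep, ih hp' (out ++ [c]) buf (c == 'i')]
    simp [pvInvAfter, endswith_i_cons]

theorem inside_run (q : List Char) (h : '"' ∉ q) :
    ∀ (out buf : List Char) (inv : Bool),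
      q.foldl pvStepA (out, buf, true, inv) = (out, buf ++ q, true, inv) := by
  induction q with
  | nil => intro out buf inv; simp
  | cons c q' ih =>
    intro out buf inv
    have hc : c ≠ '"' := fun hc => h (hc ▸ List.mem_cons_self ..)
    have hq' : '"' ∉ q' := fun hq => h (List.mem_cons_of_mem _ hq)
    have hstep : pvStepA (out, buf, true, inv) c = (out, buf ++ [c], true, inv) := by
      simp [pvStepA, hc]
    rw [List.foldl_cons, hstep, ih hq' out (buf ++ [c]) inv]
    simp

theorem quote_open (out buf : List Char) (inv : Bool) :
    pvStepA (out, buf, false, inv) '"' = (out, [], true, inv) := by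
  simp [pvStepA]

theorem quote_close (out buf : List Char) (inv : Bool) :
    pvStepA (out, buf, true, inv) '"' =
      (out ++ pvEncode (if inv then buf.reverse else buf),
        (if inv then buf.reverse else buf), false, inv) := by
  simp [pvStepA]

theorem runA (n : Nat) : ∀ (cs : List Char), cs.length ≤ n →
    ∀ (out buf : List Char) (inv : Bool),
      (cs.foldl pvStepA (out, buf, false, inv)).1 = out ++ pvGo (pvSplit [] cs) inv := by
  induction n with
  | zero =>
    intro cs hlen out buf inv
    have : cs = [] := by cases cs <;> simp_all
    subst this
    simp [pvSplit, pvGo]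
  | succ n ih =>
    intro cs hlen out buf inv
    rcases pvDecomp cs with hno | ⟨p, rest, hcs, hp⟩
    · rw [pvSplit_no_quote cs hno, outside_run cs hno]
      simp [pvGo]
    · subst hcs
      rw [pvSplit_append_quote p hp rest, List.foldl_append, outside_run p hp,
        List.foldl_cons, quote_open]
      rcases pvDecomp rest with hno2 | ⟨q, rest2, hrest, hq⟩
      · rw [pvSplit_no_quote rest hno2, inside_run rest hno2]
        simp [pvGo]
      · subst hrest
        rw [pvSplit_append_quote q hq rest2, List.foldl_append, inside_run q hq,
          List.foldl_cons, quote_close]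
        have hlen2 : rest2.length ≤ n := by
          simp only [List.length_append, List.length_cons] at hlen
          omega
        rw [ih rest2 hlen2]
        rcases hsp : pvSplit ([] : List Char) rest2 with _ | ⟨r, rest'⟩
        · exact absurd hsp (pvSplit_ne_nil [] rest2)
        · simp only [pvGo, pvInvAfter, List.nil_append]
          split_ifs <;> simp

-- ===== VERDICT (by name: the statement is the Claim_ definition above) =====
theorem preprocess_string_literals_spec : Claim_equal_preprocess_string_literals := by
  intro program _
  unfold Spec_preprocess_string_literals preprocess_string_literals preprocess_string_literals_alt
  rw [splitOn_eq_pvSplit, runA program.toList.length program.toList (Nat.le_refl _)]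
  simp
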